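-- pv_equiv track=rewrite | github.com/canozo/aoc16 | day22/main.py | count_viable_nodes
-- ===== SOURCE A (Python) =====
-- def count_viable_nodes(database):
--     count = 0
--     for i in range(len(database)):
--         for j in range(len(database)):
--             if i == j:
--                 continue
--
--             a = database[i]
--             b = database[j]
--             if a[3] != 0 and a[3] <= b[-1]:
--                 count += 1
--     return count
-- ===== SOURCE B (Python) =====
-- def count_viable_nodes(database):
--     n = len(database)
--     if n < 2:
--         return 0
--     avails = sorted(row[-1] for row in database)
--     count = 0
--     for row in database:
--         used = row[3]
--         if used != 0:
--             # binary search: number of avail values < used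
--             lo, hi = 0, n
--             while lo < hi:
--                 mid = (lo + hi) // 2
--                 if avails[mid] < used:
--                     lo = mid + 1
--                 else:
--                     hi = mid
--             count += n - lo
--             if used <= row[-1]:
--                 count -= 1
--     return count
-- ===== Notes on version B (the rewrite author's own statement) =====
-- stated objective: faster
-- what changed: Replaces the O(n^2) all-pairs double loop with sorting the avail values once and, for each node with nonzero used, counting qualifying partners by binary search (subtracting the self-pair).
import Mathlib
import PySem

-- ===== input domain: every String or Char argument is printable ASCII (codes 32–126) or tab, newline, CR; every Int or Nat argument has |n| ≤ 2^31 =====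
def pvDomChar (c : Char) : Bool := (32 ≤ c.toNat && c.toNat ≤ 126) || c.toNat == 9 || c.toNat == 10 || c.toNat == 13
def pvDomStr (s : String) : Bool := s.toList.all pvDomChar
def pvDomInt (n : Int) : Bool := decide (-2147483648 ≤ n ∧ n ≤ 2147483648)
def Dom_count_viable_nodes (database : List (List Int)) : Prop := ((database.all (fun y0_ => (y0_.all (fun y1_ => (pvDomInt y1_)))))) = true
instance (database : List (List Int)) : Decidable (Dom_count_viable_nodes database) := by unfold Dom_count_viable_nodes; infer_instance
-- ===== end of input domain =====

-- B replaces A's O(n^2) all-pairs double loop by sorting the avail column once and counting matches per node with a binary search.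

-- ===== PORT A =====
def count_viable_nodes (database : List (List Int)) : Int :=
  (PySem.List.pyRange 0 (PySem.List.len database) 1).foldl (fun count i =>
    (PySem.List.pyRange 0 (PySem.List.len database) 1).foldl (fun count j =>
      if i == j then count
      else
        let a := PySem.List.pyGetD database i []
        let b := PySem.List.pyGetD database j []
        if PySem.List.pyGetD a 3 0 ≠ 0 ∧ PySem.List.pyGetD a 3 0 ≤ PySem.List.pyGetD b (-1) 0 then
          count + 1
        else count) count) 0

-- ===== PORT B =====
-- hand-written binary-search loop from Source B ('while lo < hi: …'), ported as structural
-- recursion on a fuel that bounds the number of iterations (hi - lo suffices)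
def pvBsearchGo (a : List Int) (x : Int) : Nat → Nat → Nat → Nat
  | 0, lo, _ => lo
  | fuel + 1, lo, hi =>
    if lo < hi then
      if a.getD ((lo + hi) / 2) 0 < x then pvBsearchGo a x fuel ((lo + hi) / 2 + 1) hi
      else pvBsearchGo a x fuel lo ((lo + hi) / 2)
    else lo

def pvBsearch (a : List Int) (x : Int) (lo hi : Nat) : Nat :=
  pvBsearchGo a x (hi - lo) lo hi

def count_viable_nodes_alt (database : List (List Int)) : Int :=
  let n := database.length
  if n < 2 then 0
  else
    let avails := PySem.List.sorted (database.map (fun row => PySem.List.pyGetD row (-1) 0)) (fun x => x) false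
    database.foldl (fun count row =>
      let used := PySem.List.pyGetD row 3 0
      if used ≠ 0 then
        let lo := pvBsearch avails used 0 n
        let c := count + ((n : Int) - (lo : Int))
        if used ≤ PySem.List.pyGetD row (-1) 0 then c - 1 else c
      else count) 0

-- ===== PRECONDITION & SPEC =====
-- Pre_ excludes exactly the inputs on which the Python A raises an IndexError: with at
-- least two rows every row is read at index 3, so any row shorter than 4 entries raises.
def Pre_count_viable_nodes (database : List (List Int)) : Prop :=
  database.length ≤ 1 ∨ ∀ row ∈ database, 4 ≤ row.length
instance (database : List (List Int)) : Decidable (Pre_count_viable_nodes database) := by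
  unfold Pre_count_viable_nodes; infer_instance

def pvWitness_count_viable_nodes : List (List Int) := [[0, 0, 8, 5, 10], [1, 0, 9, 3, 2]]

def Spec_count_viable_nodes (database : List (List Int)) (out : Int) : Prop := out = count_viable_nodes_alt database
instance (database : List (List Int)) (out : Int) : Decidable (Spec_count_viable_nodes database out) := by unfold Spec_count_viable_nodes; infer_instance

-- ===== CLAIM (what is proved, stated in full; the proofs are below) =====
def Claim_equal_count_viable_nodes : Prop := ∀ (database : List (List Int)), Dom_count_viable_nodes database → Pre_count_viable_nodes database → Spec_count_viable_nodes database (count_viable_nodes database)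

-- ===== LEMMAS AND PROOFS =====

-- abbreviations for the two columns A reads, and the per-row contribution both programs total up
def pvUsed (r : List Int) : Int := PySem.List.pyGetD r 3 0
def pvAvail (r : List Int) : Int := PySem.List.pyGetD r (-1) 0
def pvPred (a b : List Int) : Bool := decide (pvUsed a ≠ 0 ∧ pvUsed a ≤ pvAvail b)

def pvContrib (db : List (List Int)) (a : List Int) : Int :=
  if pvUsed a = 0 then 0
  else (db.countP (fun b => decide (pvUsed a ≤ pvAvail b)) : Int)
       - (if pvUsed a ≤ pvAvail a then 1 else 0)

def pvSpecSum (db : List (List Int)) : Int := (db.map (pvContrib db)).sum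

theorem pvBsearchGo_bounds (a : List Int) (x : Int) (fuel : Nat) : ∀ lo hi : Nat, lo ≤ hi →
    lo ≤ pvBsearchGo a x fuel lo hi ∧ pvBsearchGo a x fuel lo hi ≤ hi := by
  induction fuel with
  | zero => intro lo hi h; simp only [pvBsearchGo]; exact ⟨Nat.le_refl _, h⟩
  | succ f ih =>
      intro lo hi h
      rw [pvBsearchGo]
      by_cases hlt : lo < hi
      · rw [if_pos hlt]
        by_cases hm : a.getD ((lo + hi) / 2) 0 < x
        · rw [if_pos hm]; have := ih ((lo + hi) / 2 + 1) hi (by omega); omega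
        · rw [if_neg hm]; have := ih lo ((lo + hi) / 2) (by omega); omega
      · rw [if_neg hlt]; exact ⟨Nat.le_refl _, h⟩

theorem pvBsearch_bounds (a : List Int) (x : Int) (lo hi : Nat) (h : lo ≤ hi) :
    lo ≤ pvBsearch a x lo hi ∧ pvBsearch a x lo hi ≤ hi :=
  pvBsearchGo_bounds a x (hi - lo) lo hi h

theorem pvBsearchGo_spec (a : List Int) (x : Int)
    (hs : a.Pairwise (fun p q => p ≤ q)) (fuel : Nat) : ∀ lo hi : Nat,
    hi - lo ≤ fuel → lo ≤ hi → hi ≤ a.length →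
    (∀ j < lo, a.getD j 0 < x) → (∀ j, hi ≤ j → j < a.length → x ≤ a.getD j 0) →
    (∀ j < pvBsearchGo a x fuel lo hi, a.getD j 0 < x) ∧
    (∀ j, pvBsearchGo a x fuel lo hi ≤ j → j < a.length → x ≤ a.getD j 0) := by
  induction fuel with
  | zero =>
      intro lo hi hf hle hha hlo hhi
      have hlh : lo = hi := by omega
      simp only [pvBsearchGo]
      exact ⟨hlo, fun j hj hjl => hhi j (by omega) hjl⟩
  | succ f ih =>
      intro lo hi hf hle hha hlo hhi
      rw [pvBsearchGo]
      by_cases hlt : lo < hi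
      · rw [if_pos hlt]
        have hmid1 : lo ≤ (lo + hi) / 2 := by omega
        have hmid2 : (lo + hi) / 2 < hi := by omega
        by_cases hm : a.getD ((lo + hi) / 2) 0 < x
        · rw [if_pos hm]
          apply ih ((lo + hi) / 2 + 1) hi (by omega) (by omega) hha
          · intro j hj
            by_cases hjm : j = (lo + hi) / 2
            · subst hjm; exact hm
            · rcases Nat.lt_or_ge j lo with h' | h'
              · exact hlo j h'
              · have hmlen : (lo + hi) / 2 < a.length := by omega
                have hjlen : j < a.length := by omega
                have hle2 : a.getD j 0 ≤ a.getD ((lo + hi) / 2) 0 := by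
                  rw [List.getD_eq_getElem _ _ hjlen, List.getD_eq_getElem _ _ hmlen]
                  rcases Nat.lt_or_ge j ((lo + hi) / 2) with h'' | h''
                  · exact List.pairwise_iff_getElem.mp hs j ((lo + hi) / 2) hjlen hmlen h''
                  · omega
                exact lt_of_le_of_lt hle2 hm
          · exact hhi
        · rw [if_neg hm]
          apply ih lo ((lo + hi) / 2) (by omega) (by omega) (by omega) hlo
          intro j hj hjl
          have hmlen : (lo + hi) / 2 < a.length := by omega
          have hxm : x ≤ a.getD ((lo + hi) / 2) 0 := not_lt.mp hm
          rcases Nat.lt_or_ge j ((lo + hi) / 2) with h'' | h''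
          · exact absurd h'' (by omega)
          · rcases Nat.eq_or_lt_of_le h'' with h3 | h3
            · rw [← h3]; exact hxm
            · have : a.getD ((lo + hi) / 2) 0 ≤ a.getD j 0 := by
                rw [List.getD_eq_getElem _ _ hjl, List.getD_eq_getElem _ _ hmlen]
                exact List.pairwise_iff_getElem.mp hs ((lo + hi) / 2) j hmlen hjl h3
              exact le_trans hxm this
      · rw [if_neg hlt]
        exact ⟨hlo, fun j hj hjl => hhi j (by omega) hjl⟩

theorem pvBsearch_spec (a : List Int) (x : Int)
    (hs : a.Pairwise (fun p q => p ≤ q)) (lo hi : Nat)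
    (hle : lo ≤ hi) (hha : hi ≤ a.length)
    (hlo : ∀ j < lo, a.getD j 0 < x) (hhi : ∀ j, hi ≤ j → j < a.length → x ≤ a.getD j 0) :
    (∀ j < pvBsearch a x lo hi, a.getD j 0 < x) ∧
    (∀ j, pvBsearch a x lo hi ≤ j → j < a.length → x ≤ a.getD j 0) :=
  pvBsearchGo_spec a x hs (hi - lo) lo hi (Nat.le_refl _) hle hha hlo hhi

-- a list whose first r entries are < x and whose rest are ≥ x has exactly length - r entries ≥ x
theorem pv_countP_ge (a : List Int) (x : Int) (r : Nat) (hr : r ≤ a.length)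
    (h1 : ∀ j < r, a.getD j 0 < x) (h2 : ∀ j, r ≤ j → j < a.length → x ≤ a.getD j 0) :
    a.countP (fun y => decide (x ≤ y)) = a.length - r := by
  have hsplit := List.take_append_drop r a
  have ht : (a.take r).countP (fun y => decide (x ≤ y)) = 0 := by
    rw [List.countP_eq_zero]
    intro y hy
    obtain ⟨j, hj, rfl⟩ := List.mem_take_iff_getElem.mp hy
    simp only [decide_eq_true_eq, not_le]
    have hjl : j < a.length := lt_of_lt_of_le (by omega) hr
    have := h1 j (by omega)
    rwa [List.getD_eq_getElem _ _ hjl] at this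
  have hd : (a.drop r).countP (fun y => decide (x ≤ y)) = (a.drop r).length := by
    rw [List.countP_eq_length]
    intro y hy
    obtain ⟨j, hj, rfl⟩ := List.mem_iff_getElem.mp hy
    simp only [decide_eq_true_eq]
    rw [List.getElem_drop]
    have hjl : r + j < a.length := by
      simp only [List.length_drop] at hj; omega
    have := h2 (r + j) (by omega) hjl
    rwa [List.getD_eq_getElem _ _ hjl] at this
  calc a.countP (fun y => decide (x ≤ y))
      = (a.take r ++ a.drop r).countP (fun y => decide (x ≤ y)) := by rw [hsplit]
    _ = a.length - r := by rw [List.countP_append, ht, hd, List.length_drop]; omega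

theorem pv_list_range_sum (f : Nat → Int) (n : Nat) :
    ((List.range n).map f).sum = ∑ i ∈ Finset.range n, f i := by
  induction n with
  | zero => simp
  | succ m ih => rw [List.range_succ, Finset.sum_range_succ, List.map_append, List.sum_append, ih]; simp

theorem pv_sum_range_getD {α : Type} (db : List α) (f : α → Int) (d : α) :
    ∑ k ∈ Finset.range db.length, f (db.getD k d) = (db.map f).sum := by
  induction db with
  | nil => simp
  | cons r t ih =>
      rw [List.length_cons, Finset.sum_range_succ']
      simp only [List.getD_cons_succ, List.getD_cons_zero, List.map_cons, List.sum_cons]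
      rw [ih]; ring

theorem pv_sum_erase (n k : Nat) (hk : k < n) (g : Nat → Int) :
    ∑ j ∈ Finset.range n, (if j = k then 0 else g j) = (∑ j ∈ Finset.range n, g j) - g k := by
  have hmem : k ∈ Finset.range n := Finset.mem_range.mpr hk
  have h1 : ∑ j ∈ Finset.range n, (if j = k then 0 else g j)
      = (∑ j ∈ (Finset.range n).erase k, (if j = k then 0 else g j)) + (if k = k then (0:Int) else g k) :=
    (Finset.sum_erase_add _ _ hmem).symm
  rw [h1, if_pos rfl,
      Finset.sum_congr rfl (fun j hj => if_neg (Finset.ne_of_mem_erase hj)),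
      ← Finset.sum_erase_add _ g hmem]
  ring

theorem pvContrib_eq (db : List (List Int)) (a : List Int) :
    (List.countP (pvPred a) db : Int) - (if pvPred a a = true then 1 else 0) = pvContrib db a := by
  by_cases h : pvUsed a = 0
  · have hp : pvPred a = fun _ => false := by funext b; simp [pvPred, h]
    simp [pvContrib, h, hp]
  · have hp : pvPred a = fun b => decide (pvUsed a ≤ pvAvail b) := by funext b; simp [pvPred, h]
    simp [pvContrib, h, hp]

-- a fold that adds an accumulator-independent amount per element is the sum of those amounts
theorem pv_foldl_eq_sum {α : Type} (F : Int → α → Int) (f : α → Int)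
    (l : List α) (hF : ∀ c x, x ∈ l → F c x = c + f x) (acc : Int) :
    l.foldl F acc = acc + (l.map f).sum := by
  induction l generalizing acc with
  | nil => simp
  | cons r t ih =>
      simp only [List.foldl_cons, List.map_cons, List.sum_cons]
      rw [hF acc r (by simp), ih (fun c x hx => hF c x (by simp [hx]))]
      ring

theorem pv_sum_gInner (db : List (List Int)) (k : Nat) (hk : k < db.length) :
    ((List.range db.length).map (fun j =>
        if j = k then 0
        else if pvPred (db.getD k []) (db.getD j []) = true then (1:Int) else 0)).sum
      = pvContrib db (db.getD k []) := by
  rw [pv_list_range_sum,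
      pv_sum_erase db.length k hk (fun j => if pvPred (db.getD k []) (db.getD j []) = true then (1:Int) else 0),
      pv_sum_range_getD db (fun b => if pvPred (db.getD k []) b = true then (1:Int) else 0) [],
      PySem.List.sum_map_ite_one_zero, pvContrib_eq]

theorem pv_A_eq_spec (db : List (List Int)) : count_viable_nodes db = pvSpecSum db := by
  unfold count_viable_nodes
  rw [PySem.List.len_eq, PySem.List.pyRange_zero_natCast]
  simp only [List.foldl_map]
  rw [pv_foldl_eq_sum _ (fun k => pvContrib db (db.getD k [])) _ ?hF]
  case hF =>
    intro c k hk
    rw [pv_foldl_eq_sum _ (fun j =>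
          if j = k then 0
          else if pvPred (db.getD k []) (db.getD j []) = true then (1:Int) else 0) _ ?hG]
    case hG =>
      intro c' j hj
      simp only [PySem.List.pyGetD_natCast]
      by_cases hjk : j = k
      · subst hjk; simp
      · have hne : ¬ ((k : Int) = (j : Int)) := by exact_mod_cast Ne.symm hjk
        simp only [beq_iff_eq, if_neg hne, if_neg hjk, pvPred, pvUsed, pvAvail, decide_eq_true_eq]
        split_ifs <;> ring
    rw [pv_sum_gInner db k (List.mem_range.mp hk)]
  rw [pv_list_range_sum, pv_sum_range_getD db (pvContrib db) []]
  simp [pvSpecSum]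

theorem pv_search_count (db : List (List Int)) (u : Int) :
    (db.countP (fun b => decide (u ≤ pvAvail b)) : Int)
      = (db.length : Int)
        - (pvBsearch (PySem.List.sorted (db.map pvAvail) (fun x => x) false) u 0 db.length : Int) := by
  have hlen : (PySem.List.sorted (db.map pvAvail) (fun x => x) false).length = db.length := by
    rw [PySem.List.length_sorted, List.length_map]
  have hr := (pvBsearch_bounds (PySem.List.sorted (db.map pvAvail) (fun x => x) false) u 0 db.length (Nat.zero_le _)).2
  have hpw : (PySem.List.sorted (db.map pvAvail) (fun x => x) false).Pairwise (fun p q : Int => p ≤ q) :=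
    PySem.List.sorted_pairwise _ _
  have hsp := pvBsearch_spec _ u hpw 0 db.length (Nat.zero_le _) (le_of_eq hlen.symm)
    (fun j hj => absurd hj (Nat.not_lt_zero j))
    (fun j hj hjl => absurd hjl (by omega))
  have hc := pv_countP_ge _ u (pvBsearch (PySem.List.sorted (db.map pvAvail) (fun x => x) false) u 0 db.length)
    (by omega) hsp.1 hsp.2
  have hperm := ((PySem.List.sorted_perm (db.map pvAvail) (fun x => x) false).countP_eq
    (fun y => decide (u ≤ y)))
  rw [List.countP_map] at hperm
  have hcomp : ((fun y => decide (u ≤ y)) ∘ pvAvail) = (fun b => decide (u ≤ pvAvail b)) := rfl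
  rw [hcomp] at hperm
  rw [← hperm, hc, hlen]
  omega

theorem pv_body_B (db : List (List Int)) (c : Int) (row : List Int) :
    (if pvUsed row ≠ 0 then
       (if pvUsed row ≤ pvAvail row then
          c + ((db.length : Int)
               - (pvBsearch (PySem.List.sorted (db.map pvAvail) (fun x => x) false) (pvUsed row) 0 db.length : Int)) - 1
        else
          c + ((db.length : Int)
               - (pvBsearch (PySem.List.sorted (db.map pvAvail) (fun x => x) false) (pvUsed row) 0 db.length : Int)))
     else c) = c + pvContrib db row := by
  by_cases hu : pvUsed row = 0
  · simp [hu, pvContrib]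
  · rw [pvContrib, if_neg hu, ← pv_search_count db (pvUsed row)]
    split_ifs <;> ring
  
theorem pv_contrib_singleton (r : List Int) : pvContrib [r] r = 0 := by
  by_cases hu : pvUsed r = 0
  · simp [pvContrib, hu]
  · by_cases hle : pvUsed r ≤ pvAvail r <;>
      simp [pvContrib, hu, hle, List.countP_nil]

theorem pv_B_eq_spec (db : List (List Int)) : count_viable_nodes_alt db = pvSpecSum db := by
  by_cases h2 : db.length < 2
  · rcases db with _ | ⟨r, _ | ⟨s, t⟩⟩
    · simp [count_viable_nodes_alt, pvSpecSum]
    · simp [count_viable_nodes_alt, pvSpecSum, pv_contrib_singleton]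
    · simp at h2
  · simp only [count_viable_nodes_alt]
    rw [if_neg h2]
    show db.foldl (fun count row =>
        if pvUsed row ≠ 0 then
          (if pvUsed row ≤ pvAvail row then
             count + ((db.length : Int)
               - (pvBsearch (PySem.List.sorted (db.map pvAvail) (fun x => x) false) (pvUsed row) 0 db.length : Int)) - 1
           else
             count + ((db.length : Int)
               - (pvBsearch (PySem.List.sorted (db.map pvAvail) (fun x => x) false) (pvUsed row) 0 db.length : Int)))
        else count) 0 = pvSpecSum db
    rw [pv_foldl_eq_sum _ (pvContrib db) _ (fun c row _ => pv_body_B db c row)]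
    simp [pvSpecSum]

-- ===== VERDICT (by name: the statement is the Claim_ definition above) =====
theorem count_viable_nodes_spec : Claim_equal_count_viable_nodes := by
  intro db _ _
  unfold Spec_count_viable_nodes
  rw [pv_A_eq_spec, pv_B_eq_spec]
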